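-- pv_equiv track=rewrite | github.com/cheng-amundsen/wechat_wegoing | code/run.py | get_enckey
-- ===== SOURCE A (Python) =====
-- def get_enckey(sessionid, nonce):
--     n, s, r, a = '0123456789abcdef', '', 4026531840, 28
--     for o in range(8):
--         s += n[(r & nonce) >> a]
--         r >>= 4
--         a -= 4
--     for h in range(12):
--         s += n[(240 & ord(sessionid[h])) >> 4]
--         s += n[15 & ord(sessionid[h])]
--     return s
-- ===== SOURCE B (Python) =====
-- def get_enckey(sessionid, nonce):
--     # closed-form hex of the low 32 bits of nonce (matches the 8-nibble extraction loop)
--     s = format(nonce & 0xFFFFFFFF, '08x')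
--     for h in range(12):
--         s += format(ord(sessionid[h]) & 0xff, '02x')
--     return s
-- ===== Notes on version B (the rewrite author's own statement) =====
-- stated objective: simpler
-- what changed: Replaces the 8-step mask/shift nibble-extraction loop with state (s, r, a) by a single closed-form format(nonce & 0xFFFFFFFF, '08x'), and emits each sessionid byte with one format(ord & 0xff, '02x') call instead of two manual nibble lookups into a digit table.
import Mathlib
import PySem

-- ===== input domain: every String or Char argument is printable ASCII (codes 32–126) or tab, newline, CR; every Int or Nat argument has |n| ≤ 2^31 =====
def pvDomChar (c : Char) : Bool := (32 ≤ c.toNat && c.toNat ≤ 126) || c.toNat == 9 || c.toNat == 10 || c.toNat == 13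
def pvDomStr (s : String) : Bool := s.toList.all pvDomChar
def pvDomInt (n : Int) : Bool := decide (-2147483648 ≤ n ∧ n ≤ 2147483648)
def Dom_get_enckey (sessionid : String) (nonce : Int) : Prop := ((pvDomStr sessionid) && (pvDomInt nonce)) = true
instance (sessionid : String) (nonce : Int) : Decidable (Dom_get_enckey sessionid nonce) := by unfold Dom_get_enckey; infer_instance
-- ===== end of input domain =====

-- B replaces A's 8-step mask/shift nibble loop by a closed-form fixed-width hex rendering of
-- nonce's low 32 bits, and emits each sessionid byte as one 2-digit hex render of ord&0xff
-- instead of two manual nibble lookups in a digit table (objective: simpler).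

-- ===== PORT A =====
-- n = '0123456789abcdef'
def pvHexDigits : List Char := "0123456789abcdef".toList

def get_enckey (sessionid : String) (nonce : Int) : String :=
  let cs := sessionid.toList
  -- first loop: state (s, r, a) starting at ('', 4026531840, 28); a stays in {28,24,…,0},
  -- so Python's 'r >> a' is '>>> a.toNat' exactly.  The table index is always 0..15, so
  -- the n[...] lookup never raises and the '?' default is unreachable.
  let st := (List.range 8).foldl
    (fun (st : List Char × Int × Int) _ =>
      let s := st.1
      let r := st.2.1
      let a := st.2.2
      (s ++ [(PySem.List.pyGet? pvHexDigits (PySem.Int.band r nonce >>> a.toNat)).getD '?'],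
       r >>> 4, a - 4))
    ([], 4026531840, 28)
  -- second loop: sessionid[h] raises IndexError when len(sessionid) < 12 — excluded by Pre_
  let s := (List.range 12).foldl
    (fun (s : List Char) h =>
      let o : Int := ((PySem.List.pyGet? cs (h : Int)).getD '?').toNat
      s ++ [(PySem.List.pyGet? pvHexDigits (PySem.Int.band 240 o >>> (4:Nat))).getD '?']
        ++ [(PySem.List.pyGet? pvHexDigits (PySem.Int.band 15 o)).getD '?'])
    st.1
  String.mk s

-- ===== PORT B =====
-- format(x, '0{w}x') for 0 ≤ x < 16^w, ported by hand (exact there): w hex digits, low nibble last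
def pvHexFixed : Nat → Nat → List Char
  | 0, _ => []
  | w + 1, x => pvHexFixed w (x / 16) ++ [Nat.digitChar (x % 16)]

def get_enckey_alt (sessionid : String) (nonce : Int) : String :=
  -- s = format(nonce & 0xFFFFFFFF, '08x')
  let s := pvHexFixed 8 (PySem.Int.band nonce 4294967295).toNat
  let cs := sessionid.toList
  -- s += format(ord(sessionid[h]) & 0xff, '02x'); sessionid[h] raises when len < 12 (outside Pre_)
  String.mk ((List.range 12).foldl
    (fun (s : List Char) h =>
      s ++ pvHexFixed 2 (((PySem.List.pyGet? cs (h : Int)).getD '?').toNat &&& 255)) s)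

-- ===== PRECONDITION & SPEC =====
-- Pre_ excludes only sessionids shorter than 12 characters, on which both A and B raise IndexError.
def Pre_get_enckey (sessionid : String) (nonce : Int) : Prop := 12 ≤ sessionid.toList.length
instance (sessionid : String) (nonce : Int) : Decidable (Pre_get_enckey sessionid nonce) := by unfold Pre_get_enckey; infer_instance
def pvWitness_get_enckey : String × Int := ("abcXYZ012 !~", -77)
def Spec_get_enckey (sessionid : String) (nonce : Int) (out : String) : Prop := out = get_enckey_alt sessionid nonce
instance (sessionid : String) (nonce : Int) (out : String) : Decidable (Spec_get_enckey sessionid nonce out) := by unfold Spec_get_enckey; infer_instance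

-- ===== CLAIM (what is proved, stated in full; the proofs are below) =====
def Claim_equal_get_enckey : Prop := ∀ (sessionid : String) (nonce : Int), Dom_get_enckey sessionid nonce → Pre_get_enckey sessionid nonce → Spec_get_enckey sessionid nonce (get_enckey sessionid nonce)

-- ===== LEMMAS AND PROOFS =====

-- the bits a..a+3 of j, as an arithmetic expression
theorem pv_and_mask (j a : Nat) : j &&& 15 * 2 ^ a = j / 2 ^ a % 16 * 2 ^ a := by
  have h15 : (15 : Nat) * 2 ^ a = (15 <<< a) := by simp [Nat.shiftLeft_eq, Nat.mul_comm]
  apply Nat.eq_of_testBit_eq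
  intro i
  rcases lt_or_ge i a with hi | hi
  · have h1 : (j &&& 15 * 2 ^ a).testBit i = false := by
      simp [Nat.testBit_and, h15, Nat.testBit_shiftLeft, Nat.not_le.mpr hi]
    have h2 : (j / 2 ^ a % 16 * 2 ^ a).testBit i = false := by
      rw [show j / 2 ^ a % 16 * 2 ^ a = (j / 2 ^ a % 16) <<< a by simp [Nat.shiftLeft_eq]]
      simp [Nat.testBit_shiftLeft, Nat.not_le.mpr hi]
    rw [h1, h2]
  · obtain ⟨b, rfl⟩ := Nat.exists_eq_add_of_le hi
    rw [show j / 2 ^ a % 16 * 2 ^ a = (j / 2 ^ a % 16) <<< a by simp [Nat.shiftLeft_eq]]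
    simp only [Nat.testBit_and, h15, Nat.testBit_shiftLeft, Nat.add_comm a b, Nat.add_sub_cancel,
      le_add_iff_nonneg_left, Nat.zero_le, decide_true, Bool.true_and]
    rw [show (16 : Nat) = 2 ^ 4 by norm_num, Nat.testBit_mod_two_pow,
        show j / 2 ^ a = j >>> a from (Nat.shiftRight_eq_div_pow j a).symm, Nat.testBit_shiftRight,
        Nat.add_comm a b]
    rcases lt_or_ge b 4 with hb | hb
    · have ht : Nat.testBit 15 b = true := by interval_cases b <;> decide
      simp [hb, ht]
    · have ht : Nat.testBit 15 b = false := by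
        rw [show (15 : Nat) = 2 ^ 4 - 1 by norm_num, Nat.testBit_two_pow_sub_one]
        simp [Nat.not_lt.mpr hb]
      simp [ht, Nat.not_lt.mpr hb]

theorem pv_and_low (j : Nat) : j &&& 4294967295 = j % 4294967296 := by
  have h := Nat.and_two_pow_sub_one_eq_mod j 32
  norm_num at h
  exact h

theorem pv_band_nonneg (M : Nat) (x : Int) (hx : 0 ≤ x) :
    PySem.Int.band (M : Int) x = ((M &&& x.toNat : Nat) : Int) := by
  unfold PySem.Int.band
  rw [if_pos (by positivity), if_pos hx, Int.toNat_natCast]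

theorem pv_band_neg (M : Nat) (x : Int) (hx : x < 0) :
    PySem.Int.band (M : Int) x = ((M - (M &&& (-x - 1).toNat) : Nat) : Int) := by
  unfold PySem.Int.band
  rw [if_pos (by positivity), if_neg (by omega), Int.toNat_natCast]

-- the nibble A extracts with mask 15·2^a is base-16 digit a/4 of B's low-32-bit value
theorem pv_nib (x : Int) (a : Nat)
    (ha : a = 0 ∨ a = 4 ∨ a = 8 ∨ a = 12 ∨ a = 16 ∨ a = 20 ∨ a = 24 ∨ a = 28) :
    PySem.Int.band ((15 * 2 ^ a : Nat) : Int) x >>> a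
      = (((PySem.Int.band x 4294967295).toNat / 2 ^ a % 16 : Nat) : Int) := by
  have hM : (4294967295 : Int) = ((4294967295 : Nat) : Int) := by norm_num
  rw [hM, PySem.Int.band_comm x]
  rcases Int.lt_or_le x 0 with hx | hx
  · rw [pv_band_neg _ _ hx, pv_band_neg _ _ hx, Int.toNat_natCast]
    rw [show (((15 * 2 ^ a - (15 * 2 ^ a &&& (-x - 1).toNat) : Nat)) : Int) >>> a
           = (((15 * 2 ^ a - (15 * 2 ^ a &&& (-x - 1).toNat)) >>> a : Nat) : Int) from rfl]
    rw [Nat.cast_inj]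
    rw [Nat.and_comm (15 * 2 ^ a), pv_and_mask, Nat.and_comm 4294967295, pv_and_low,
        Nat.shiftRight_eq_div_pow]
    rcases ha with rfl | rfl | rfl | rfl | rfl | rfl | rfl | rfl <;> norm_num <;> omega
  · rw [pv_band_nonneg _ _ hx, pv_band_nonneg _ _ hx, Int.toNat_natCast]
    rw [show ((((15 * 2 ^ a) &&& x.toNat : Nat)) : Int) >>> a
           = (((15 * 2 ^ a &&& x.toNat) >>> a : Nat) : Int) from rfl]
    rw [Nat.cast_inj]
    rw [Nat.and_comm (15 * 2 ^ a), pv_and_mask, Nat.and_comm 4294967295, pv_and_low,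
        Nat.shiftRight_eq_div_pow]
    rcases ha with rfl | rfl | rfl | rfl | rfl | rfl | rfl | rfl <;> norm_num <;> omega

theorem pv_nib28 (x : Int) : PySem.Int.band 4026531840 x >>> (28:Nat)
    = (((PySem.Int.band x 4294967295).toNat / 268435456 % 16 : Nat) : Int) := by
  rw [show (4026531840:Int) = ((15 * 2 ^ 28 : Nat) : Int) by norm_num,
      show (268435456:Nat) = 2 ^ 28 by norm_num]
  exact pv_nib x 28 (by norm_num)

theorem pv_nib24 (x : Int) : PySem.Int.band 251658240 x >>> (24:Nat)
    = (((PySem.Int.band x 4294967295).toNat / 16777216 % 16 : Nat) : Int) := by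
  rw [show (251658240:Int) = ((15 * 2 ^ 24 : Nat) : Int) by norm_num,
      show (16777216:Nat) = 2 ^ 24 by norm_num]
  exact pv_nib x 24 (by norm_num)

theorem pv_nib20 (x : Int) : PySem.Int.band 15728640 x >>> (20:Nat)
    = (((PySem.Int.band x 4294967295).toNat / 1048576 % 16 : Nat) : Int) := by
  rw [show (15728640:Int) = ((15 * 2 ^ 20 : Nat) : Int) by norm_num,
      show (1048576:Nat) = 2 ^ 20 by norm_num]
  exact pv_nib x 20 (by norm_num)

theorem pv_nib16 (x : Int) : PySem.Int.band 983040 x >>> (16:Nat)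
    = (((PySem.Int.band x 4294967295).toNat / 65536 % 16 : Nat) : Int) := by
  rw [show (983040:Int) = ((15 * 2 ^ 16 : Nat) : Int) by norm_num,
      show (65536:Nat) = 2 ^ 16 by norm_num]
  exact pv_nib x 16 (by norm_num)

theorem pv_nib12 (x : Int) : PySem.Int.band 61440 x >>> (12:Nat)
    = (((PySem.Int.band x 4294967295).toNat / 4096 % 16 : Nat) : Int) := by
  rw [show (61440:Int) = ((15 * 2 ^ 12 : Nat) : Int) by norm_num,
      show (4096:Nat) = 2 ^ 12 by norm_num]
  exact pv_nib x 12 (by norm_num)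

theorem pv_nib8 (x : Int) : PySem.Int.band 3840 x >>> (8:Nat)
    = (((PySem.Int.band x 4294967295).toNat / 256 % 16 : Nat) : Int) := by
  rw [show (3840:Int) = ((15 * 2 ^ 8 : Nat) : Int) by norm_num,
      show (256:Nat) = 2 ^ 8 by norm_num]
  exact pv_nib x 8 (by norm_num)

theorem pv_nib4 (x : Int) : PySem.Int.band 240 x >>> (4:Nat)
    = (((PySem.Int.band x 4294967295).toNat / 16 % 16 : Nat) : Int) := by
  rw [show (240:Int) = ((15 * 2 ^ 4 : Nat) : Int) by norm_num,
      show (16:Nat) = 2 ^ 4 by norm_num]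
  exact pv_nib x 4 (by norm_num)

theorem pv_nib0 (x : Int) : PySem.Int.band 15 x
    = (((PySem.Int.band x 4294967295).toNat % 16 : Nat) : Int) := by
  have h := pv_nib x 0 (by norm_num)
  rw [pow_zero] at h
  simp only [Nat.mul_one, Nat.div_one] at h
  rw [show ((15 : Nat) : Int) = (15 : Int) by norm_num] at h
  rw [Int.shiftRight_zero] at h
  exact h

theorem pv_hexget (d : Nat) (hd : d < 16) :
    (PySem.List.pyGet? pvHexDigits (d : Int)).getD '?' = Nat.digitChar d := by
  interval_cases d <;> decide

-- A's first loop, evaluated, is B's 8-digit hex render of the low 32 bits of nonce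
theorem pv_loopA (nonce : Int) :
    ((List.range 8).foldl
      (fun (st : List Char × Int × Int) _ =>
        (st.1 ++ [(PySem.List.pyGet? pvHexDigits (PySem.Int.band st.2.1 nonce >>> st.2.2.toNat)).getD '?'],
         st.2.1 >>> 4, st.2.2 - 4))
      ([], 4026531840, 28)).1
    = pvHexFixed 8 (PySem.Int.band nonce 4294967295).toNat := by
  rw [show List.range 8 = [0,1,2,3,4,5,6,7] from rfl]
  simp only [List.foldl_cons, List.foldl_nil]
  norm_num [pvHexFixed, Nat.div_div_eq_div_mul]
  simp only [show (4026531840:Int) >>> 4 = 251658240 from by decide,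
    show (251658240:Int) >>> 4 = 15728640 from by decide,
    show (15728640:Int) >>> 4 = 983040 from by decide,
    show (983040:Int) >>> 4 = 61440 from by decide,
    show (61440:Int) >>> 4 = 3840 from by decide,
    show (3840:Int) >>> 4 = 240 from by decide,
    show (240:Int) >>> 4 = 15 from by decide,
    show Int.toNat 28 = 28 from rfl, show Int.toNat 24 = 24 from rfl,
    show Int.toNat 20 = 20 from rfl, show Int.toNat 16 = 16 from rfl,
    show Int.toNat 12 = 12 from rfl, show Int.toNat 8 = 8 from rfl,
    show Int.toNat 4 = 4 from rfl,
    pv_nib28, pv_nib24, pv_nib20, pv_nib16, pv_nib12, pv_nib8, pv_nib4, pv_nib0]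
  refine ⟨?_, ?_, ?_, ?_, ?_, ?_, ?_, ?_⟩ <;> exact pv_hexget _ (by omega)

-- a byte below 256 produces the same two characters in both ports
theorem pv_byte (s : List Char) (n : Nat) (hn : n < 256) :
    s ++ [(PySem.List.pyGet? pvHexDigits (PySem.Int.band 240 (n : Int) >>> (4:Nat))).getD '?']
      ++ [(PySem.List.pyGet? pvHexDigits (PySem.Int.band 15 (n : Int))).getD '?']
    = s ++ pvHexFixed 2 (n &&& 255) := by
  have hself : PySem.Int.band (n : Int) 4294967295 = (n : Int) := by
    rw [show (4294967295 : Int) = ((4294967295 : Nat) : Int) by norm_num,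
        PySem.Int.band_comm, pv_band_nonneg _ _ (by positivity), Int.toNat_natCast,
        Nat.and_comm, pv_and_low, Nat.mod_eq_of_lt (by omega)]
  have h255 : n &&& 255 = n := by
    have h := Nat.and_two_pow_sub_one_eq_mod n 8
    norm_num at h
    rw [h, Nat.mod_eq_of_lt (by omega)]
  rw [pv_nib4, pv_nib0, hself, Int.toNat_natCast, h255,
      pv_hexget _ (by omega), pv_hexget _ (by omega)]
  simp [pvHexFixed]

-- ===== VERDICT (by name: the statement is the Claim_ definition above) =====
theorem get_enckey_spec : Claim_equal_get_enckey := by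
  intro sessionid nonce hdom hpre
  unfold Spec_get_enckey
  simp only [get_enckey, get_enckey_alt]
  rw [pv_loopA]
  refine congrArg String.mk ?_
  apply PySem.List.foldl_congr_mem
  intro acc h hx
  obtain ⟨a, ha12, rfl⟩ : ∃ a : Nat, a < 12 ∧ h = (a : Int) := by simpa using hx
  have hlen : a < sessionid.toList.length := by
    have h12 : (12 : Nat) ≤ sessionid.toList.length := hpre
    omega
  have hget : PySem.List.pyGet? sessionid.toList ((a : Nat) : Int) = some sessionid.toList[a] := by
    rw [PySem.List.pyGet?_natCast, List.getElem?_eq_getElem hlen]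
  have hchar : sessionid.toList[a].toNat < 256 := by
    have hall : sessionid.toList.all pvDomChar = true := by
      have hd := hdom
      unfold Dom_get_enckey pvDomStr at hd
      exact ((Bool.and_eq_true _ _).mp hd).1
    have hc := List.all_eq_true.mp hall _ (List.getElem_mem hlen)
    unfold pvDomChar at hc
    simp only [Bool.or_eq_true, Bool.and_eq_true, decide_eq_true_eq, beq_iff_eq] at hc
    omega
  rw [hget]
  simp only [Option.getD_some]
  exact pv_byte acc _ hchar
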